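-- pv_equiv track=rewrite | github.com/sourcebots/srcomp-cli | sr/comp/cli/import_schedule.py | load_ids_schedule
-- ===== SOURCE A (Python) =====
-- from typing import (
--     Dict,
--     Iterable,
--     Iterator,
--     List,
--     Mapping,
--     NamedTuple,
--     NewType,
--     Optional,
--     Tuple,
--     TypeVar,
-- )
--
-- ID = NewType('ID', str)
--
-- def parse_ids(ids: str, sep: str = ',') -> List[ID]:
--     return [ID(x) for x in ids.split(sep)]
--
-- def load_ids_schedule(schedule_lines: Iterable[str]) -> Tuple[List[ID], List[List[ID]]]:
--     """
--     Converts an iterable of strings containing pipe-separated ids into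
--     a tuple: ``(ids, schedule)``. The ``ids`` is a list of unique ids
--     in the order which they first appear, the ``schedule`` is a list of
--     lists of ids in each line.
--     """
--
--     ids: List[ID] = []
--     schedule: List[List[ID]] = []
--     for match in schedule_lines:
--         match_ids = parse_ids(match, sep='|')
--         uniq_match_ids = set(match_ids)
--         assert len(match_ids) == len(uniq_match_ids), match_ids
--         schedule.append(match_ids)
--
--         for id_ in match_ids:
--             if id_ not in ids:
--                 ids.append(id_)
--
--     return ids, schedule
-- ===== SOURCE B (Python) =====
-- def load_ids_schedule(schedule_lines):
--     # Build schedule, validate, then recover first-appearance order by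
--     # SORTING the distinct ids by their first index in the flattened stream.
--     schedule = [line.split('|') for line in schedule_lines]
--     for match in schedule:
--         assert len(match) == len(set(match)), match
--     flat = [id_ for match in schedule for id_ in match]
--     ids = sorted(set(flat), key=flat.index)
--     return ids, schedule
-- ===== Notes on version B (the rewrite author's own statement) =====
-- stated objective: alternative
-- what changed: Replaces A's interleaved loop with its incremental linear-membership dedupe by a staged build/validate pass and a different dedup algorithm: sort the distinct ids (set(flat)) by their first index in the flattened id stream, which provably recovers first-appearance order.
import Mathlib
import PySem

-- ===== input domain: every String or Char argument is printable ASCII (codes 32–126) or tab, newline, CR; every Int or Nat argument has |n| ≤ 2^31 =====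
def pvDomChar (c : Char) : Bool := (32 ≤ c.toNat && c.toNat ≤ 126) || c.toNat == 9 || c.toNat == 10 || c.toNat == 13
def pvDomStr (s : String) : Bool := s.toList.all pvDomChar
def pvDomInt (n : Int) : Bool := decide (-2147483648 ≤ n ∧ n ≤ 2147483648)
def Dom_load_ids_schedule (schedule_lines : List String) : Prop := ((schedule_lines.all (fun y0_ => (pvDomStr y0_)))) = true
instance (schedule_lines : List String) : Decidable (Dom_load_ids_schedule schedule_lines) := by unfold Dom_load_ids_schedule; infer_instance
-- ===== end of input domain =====

-- B replaces A's interleaved accumulate-while-parsing loop by: build schedule, validate, then SORT the distinct ids by their first index in the flattened stream (alternative algorithm for the ordered dedupe; same result, not claimed faster).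


-- ===== PORT A =====
-- s.split('|') (separator nonempty, so split? is always some)
def pySplitPipe (s : String) : List String :=
  (PySem.Str.split? s "|").getD []

-- parse_ids(ids, sep='|') = [ID(x) for x in ids.split('|')]
def parse_ids_pipe (ids : String) : List String :=
  (pySplitPipe ids).map (fun x => x)

def load_ids_schedule (schedule_lines : List String) : List String × List (List String) :=
  let r := schedule_lines.foldl
    (fun (st : List String × List (List String)) mtch =>
      let match_ids := parse_ids_pipe mtch
      -- 'assert len(match_ids) == len(set(match_ids))' raises outside Pre_; on Pre_ it passes (no-op)
      let schedule := st.2 ++ [match_ids]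
      let ids := match_ids.foldl (fun ids id_ => if id_ ∈ ids then ids else ids ++ [id_]) st.1
      (ids, schedule))
    ([], [])
  (r.1, r.2)

-- ===== PORT B =====
-- sorted(set(flat), key=flat.index); flat.index never raises here since every element of set(flat) is in flat
def load_ids_schedule_alt (schedule_lines : List String) : List String × List (List String) :=
  let schedule := schedule_lines.map (fun line => pySplitPipe line)
  let flat := schedule.flatten
  let ids := PySem.List.sorted (PySem.Set.ofList flat)
      (fun x => (PySem.List.index? flat x).getD 0) false
  (ids, schedule)

-- ===== PRECONDITION & SPEC =====
-- A's assert raises AssertionError on any line whose pipe-separated ids contain a duplicate; Pre_ admits exactly the lines that pass it.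
def Pre_load_ids_schedule (schedule_lines : List String) : Prop :=
  ∀ line ∈ schedule_lines, (pySplitPipe line).Nodup
instance (schedule_lines : List String) : Decidable (Pre_load_ids_schedule schedule_lines) := by unfold Pre_load_ids_schedule; infer_instance
def pvWitness_load_ids_schedule : List String := ["a|b", "b|c"]

def Spec_load_ids_schedule (schedule_lines : List String) (out : List String × List (List String)) : Prop := out = load_ids_schedule_alt schedule_lines
instance (schedule_lines : List String) (out : List String × List (List String)) : Decidable (Spec_load_ids_schedule schedule_lines out) := by unfold Spec_load_ids_schedule; infer_instance

-- ===== CLAIM (what is proved, stated in full; the proofs are below) =====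
def Claim_equal_load_ids_schedule : Prop := ∀ (schedule_lines : List String), Dom_load_ids_schedule schedule_lines → Pre_load_ids_schedule schedule_lines → Spec_load_ids_schedule schedule_lines (load_ids_schedule schedule_lines)

-- ===== LEMMAS AND PROOFS =====
-- A's inner "if id_ not in ids" accumulator is exactly PySem.Set.add.
theorem addU_eq_set_add (ids : List String) (x : String) :
    (if x ∈ ids then ids else ids ++ [x]) = PySem.Set.add ids x := by
  simp [PySem.Set.add, PySem.Set.contains]

-- A's fold, from an arbitrary state, computed in closed form.
theorem loopA_eq (lines : List String) (ids0 : List String) (sched0 : List (List String)) :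
    lines.foldl
      (fun (st : List String × List (List String)) mtch =>
        let match_ids := parse_ids_pipe mtch
        let schedule := st.2 ++ [match_ids]
        let ids := match_ids.foldl (fun ids id_ => if id_ ∈ ids then ids else ids ++ [id_]) st.1
        (ids, schedule))
      (ids0, sched0)
    = ((lines.map (fun l => pySplitPipe l)).flatten.foldl PySem.Set.add ids0,
       sched0 ++ lines.map (fun l => pySplitPipe l)) := by
  induction lines generalizing ids0 sched0 with
  | nil => simp
  | cons l rest ih =>
    simp only [List.foldl_cons, List.map_cons, List.flatten_cons, List.foldl_append]
    rw [ih]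
    simp [parse_ids_pipe]
    congr 1
    apply PySem.List.foldl_congr_mem
    intro acc x _
    exact addU_eq_set_add acc x

-- elements of a list have an index below its length
theorem idx_lt_len {xs : List String} {x : String} (hx : x ∈ xs) :
    (PySem.List.index? xs x).getD 0 < xs.length := by
  have h := (PySem.List.index?_isSome_iff xs x).mpr hx
  rcases Option.isSome_iff_exists.mp h with ⟨k, hk⟩
  rcases (PySem.List.index?_eq_some_iff xs x k).mp hk with ⟨pre, suf, hxs, hlen, _⟩
  rw [hk, Option.getD_some]
  subst hxs
  simp [← hlen]

-- set(flat) in first-occurrence order has strictly increasing first indices in flat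
theorem ofList_pairwise_idx (xs : List String) :
    (PySem.Set.ofList xs).Pairwise
      (fun a b => (PySem.List.index? xs a).getD 0 < (PySem.List.index? xs b).getD 0) := by
  induction xs using List.reverseRecOn with
  | nil => simp [PySem.Set.ofList_nil]
  | append_singleton xs x ih =>
    rw [PySem.Set.ofList_append_singleton]
    by_cases hx : x ∈ PySem.Set.ofList xs
    · have hset : PySem.Set.add (PySem.Set.ofList xs) x = PySem.Set.ofList xs := by
        simp [PySem.Set.add, PySem.Set.contains, hx]
      rw [hset]
      refine ih.imp_of_mem ?_
      intro a b ha hb hab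
      have ha' : a ∈ xs := (PySem.Set.mem_ofList xs a).mp ha
      have hb' : b ∈ xs := (PySem.Set.mem_ofList xs b).mp hb
      rw [PySem.List.index?_append_of_mem [x] ha', PySem.List.index?_append_of_mem [x] hb']
      exact hab
    · have hx' : x ∉ xs := fun h => hx ((PySem.Set.mem_ofList xs x).mpr h)
      have hset : PySem.Set.add (PySem.Set.ofList xs) x = PySem.Set.ofList xs ++ [x] := by
        simp [PySem.Set.add, PySem.Set.contains, hx]
      rw [hset]
      apply List.pairwise_append.mpr
      refine ⟨?_, by simp, ?_⟩
      · refine ih.imp_of_mem ?_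
        intro a b ha hb hab
        have ha' : a ∈ xs := (PySem.Set.mem_ofList xs a).mp ha
        have hb' : b ∈ xs := (PySem.Set.mem_ofList xs b).mp hb
        rw [PySem.List.index?_append_of_mem [x] ha', PySem.List.index?_append_of_mem [x] hb']
        exact hab
      · intro a ha b hb
        have ha' : a ∈ xs := (PySem.Set.mem_ofList xs a).mp ha
        have hb' : b = x := by simpa using hb
        subst hb'
        rw [PySem.List.index?_append_of_mem [b] ha',
            PySem.List.index?_append_singleton_self xs b hx']
        simpa using idx_lt_len ha'

-- sorting set(flat) by first index recovers first-occurrence order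
theorem sorted_ofList_idx (flat : List String) :
    PySem.List.sorted (PySem.Set.ofList flat)
      (fun x => (PySem.List.index? flat x).getD 0) false = PySem.Set.ofList flat :=
  PySem.List.sorted_eq_of_perm_of_pairwise_lt (PySem.Set.ofList flat) (PySem.Set.ofList flat)
    (fun x => (PySem.List.index? flat x).getD 0) (List.Perm.refl _) (ofList_pairwise_idx flat)

-- ===== VERDICT (by name: the statement is the Claim_ definition above) =====
theorem load_ids_schedule_spec : Claim_equal_load_ids_schedule := by
  intro lines _ _
  show load_ids_schedule lines = load_ids_schedule_alt lines
  unfold load_ids_schedule load_ids_schedule_alt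
  simp only [loopA_eq, sorted_ofList_idx]
  simp [PySem.Set.ofList_eq_foldl]
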